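-- pv_equiv track=rewrite | github.com/alokgarg003/ticketinsight-pro | src/ticketinsight/nlp/ner_extractor.py | _generate_entity_summary
-- ===== SOURCE A (Python) =====
-- from typing import Any, Dict, List, Optional, Set, Tuple
--
-- def _generate_entity_summary(
--
--     spacy_entities: List[Dict[str, Any]],
--     it_entities: Dict[str, List[str]],
-- ) -> str:
--     """Generate a human-readable summary of extracted entities.
--
--     Parameters
--     ----------
--     spacy_entities : list[dict]
--         spaCy-extracted entities.
--     it_entities : dict
--         IT-specific entities.
--
--     Returns
--     -------
--     str
--         Natural language summary of key entities found.
--     """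
--     parts = []
--
--     # Summarize people
--     people = [e["text"] for e in spacy_entities if e["label"] == "PERSON"]
--     if people:
--         unique_people = list(dict.fromkeys(people))[:5]
--         if len(unique_people) == 1:
--             parts.append(f"Mentions person: {unique_people[0]}")
--         else:
--             parts.append(f"Mentions {len(unique_people)} people: {', '.join(unique_people[:5])}")
--
--     # Summarize organizations
--     orgs = [e["text"] for e in spacy_entities if e["label"] == "ORG"]
--     if orgs:
--         unique_orgs = list(dict.fromkeys(orgs))[:5]
--         parts.append(f"Organizations: {', '.join(unique_orgs)}")
--
--     # Summarize dates
--     dates = [e["text"] for e in spacy_entities if e["label"] == "DATE"]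
--     if dates:
--         unique_dates = list(dict.fromkeys(dates))[:3]
--         parts.append(f"Dates mentioned: {', '.join(unique_dates)}")
--
--     # Summarize IT entities
--     if it_entities.get("ip_addresses"):
--         parts.append(f"IP addresses: {', '.join(it_entities['ip_addresses'][:3])}")
--
--     if it_entities.get("error_codes"):
--         parts.append(f"Error codes: {', '.join(it_entities['error_codes'][:3])}")
--
--     if it_entities.get("software_names"):
--         parts.append(f"Software: {', '.join(it_entities['software_names'][:5])}")
--
--     if it_entities.get("hardware_names"):
--         parts.append(f"Hardware: {', '.join(it_entities['hardware_names'][:5])}")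
--
--     if it_entities.get("file_paths"):
--         parts.append(f"File paths referenced: {len(it_entities['file_paths'])}")
--
--     if not parts:
--         return "No significant entities extracted."
--
--     return ". ".join(parts) + "."
-- ===== SOURCE B (Python) =====
-- def _sections(spacy_entities, it_entities):
--     """Yield summary parts one by one; spacy entities are consumed in a single
--     pass that maintains capped, duplicate-free buckets (no full dedup list)."""
--     caps = {"PERSON": 5, "ORG": 5, "DATE": 3}
--     buckets = {"PERSON": [], "ORG": [], "DATE": []}
--     for e in spacy_entities:
--         lab = e["label"]
--         if lab in buckets:
--             text = e["text"]
--             b = buckets[lab]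
--             if len(b) < caps[lab] and text not in b:
--                 b.append(text)
--     people = buckets["PERSON"]
--     if people:
--         if len(people) == 1:
--             yield "Mentions person: " + people[0]
--         else:
--             yield "Mentions " + str(len(people)) + " people: " + ", ".join(people)
--     if buckets["ORG"]:
--         yield "Organizations: " + ", ".join(buckets["ORG"])
--     if buckets["DATE"]:
--         yield "Dates mentioned: " + ", ".join(buckets["DATE"])
--     for key, title, cap in (("ip_addresses", "IP addresses", 3),
--                             ("error_codes", "Error codes", 3),
--                             ("software_names", "Software", 5),
--                             ("hardware_names", "Hardware", 5)):
--         vals = it_entities.get(key)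
--         if vals:
--             yield title + ": " + ", ".join(vals[:cap])
--     fp = it_entities.get("file_paths")
--     if fp:
--         yield "File paths referenced: " + str(len(fp))
--
--
-- def _generate_entity_summary(spacy_entities, it_entities):
--     parts = list(_sections(spacy_entities, it_entities))
--     return ". ".join(parts) + "." if parts else "No significant entities extracted."
-- ===== Notes on version B (the rewrite author's own statement) =====
-- stated objective: alternative
-- what changed: B replaces A's three filtering comprehensions plus dict.fromkeys-then-slice dedup with a single pass over spacy_entities that maintains capped duplicate-free buckets (never storing more than 5/5/3 texts per label), and emits the summary parts lazily from a generator instead of accumulating a parts list.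
import Mathlib
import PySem

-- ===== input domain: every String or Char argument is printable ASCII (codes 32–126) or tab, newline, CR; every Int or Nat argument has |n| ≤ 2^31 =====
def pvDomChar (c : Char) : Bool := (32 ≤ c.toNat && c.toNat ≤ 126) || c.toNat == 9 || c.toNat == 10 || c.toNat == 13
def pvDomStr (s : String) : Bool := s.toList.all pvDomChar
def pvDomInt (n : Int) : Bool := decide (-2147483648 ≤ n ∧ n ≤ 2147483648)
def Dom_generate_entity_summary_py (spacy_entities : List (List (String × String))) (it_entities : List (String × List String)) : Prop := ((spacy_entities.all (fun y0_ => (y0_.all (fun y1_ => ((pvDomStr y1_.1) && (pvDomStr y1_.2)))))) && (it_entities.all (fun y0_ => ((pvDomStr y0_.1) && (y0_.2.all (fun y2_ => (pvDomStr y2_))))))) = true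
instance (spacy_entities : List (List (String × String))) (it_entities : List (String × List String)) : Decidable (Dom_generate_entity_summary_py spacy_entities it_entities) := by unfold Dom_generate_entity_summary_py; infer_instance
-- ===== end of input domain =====

-- B re-implements A with a different data structure and pass structure: instead of A's three
-- filtering comprehensions followed by dict.fromkeys dedup and slicing, B makes ONE pass over
-- spacy_entities maintaining capped duplicate-free buckets (at most 5/5/3 texts are ever stored),
-- and emits the summary parts one by one from a generator (objective: alternative).

-- ===== PORT A =====
-- e[k] for the entity dicts; Pre_ guarantees the key is present wherever A's Python evaluates it
def aField (e : List (String × String)) (k : String) : String :=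
  ((PySem.Dict.mk e).get? k).getD ""

def generate_entity_summary_py (spacy_entities : List (List (String × String))) (it_entities : List (String × List String)) : String :=
  let itd := PySem.Dict.mk it_entities
  -- people = [e["text"] for e in spacy_entities if e["label"] == "PERSON"]
  let people := (spacy_entities.filter (fun e => aField e "label" == "PERSON")).map (fun e => aField e "text")
  let parts : List String :=
    if people.isEmpty then [] else
      let up := (PySem.List.dedup people).take 5   -- list(dict.fromkeys(people))[:5]
      if up.length == 1 then ["Mentions person: " ++ up.headD ""]   -- up[0]; guarded by length == 1
      else ["Mentions " ++ PySem.Int.toStr (up.length : Int) ++ " people: " ++ PySem.Str.join ", " (up.take 5)]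
  let orgs := (spacy_entities.filter (fun e => aField e "label" == "ORG")).map (fun e => aField e "text")
  let parts := if orgs.isEmpty then parts else
      parts ++ ["Organizations: " ++ PySem.Str.join ", " ((PySem.List.dedup orgs).take 5)]
  let dates := (spacy_entities.filter (fun e => aField e "label" == "DATE")).map (fun e => aField e "text")
  let parts := if dates.isEmpty then parts else
      parts ++ ["Dates mentioned: " ++ PySem.Str.join ", " ((PySem.List.dedup dates).take 3)]
  -- it_entities.get(k) truthy ↔ getD k [] nonempty (None and [] are both falsy)
  let parts := if (itd.getD "ip_addresses" []).isEmpty then parts else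
      parts ++ ["IP addresses: " ++ PySem.Str.join ", " ((itd.getD "ip_addresses" []).take 3)]
  let parts := if (itd.getD "error_codes" []).isEmpty then parts else
      parts ++ ["Error codes: " ++ PySem.Str.join ", " ((itd.getD "error_codes" []).take 3)]
  let parts := if (itd.getD "software_names" []).isEmpty then parts else
      parts ++ ["Software: " ++ PySem.Str.join ", " ((itd.getD "software_names" []).take 5)]
  let parts := if (itd.getD "hardware_names" []).isEmpty then parts else
      parts ++ ["Hardware: " ++ PySem.Str.join ", " ((itd.getD "hardware_names" []).take 5)]
  let parts := if (itd.getD "file_paths" []).isEmpty then parts else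
      parts ++ ["File paths referenced: " ++ PySem.Int.toStr ((itd.getD "file_paths" []).length : Int)]
  if parts.isEmpty then "No significant entities extracted." else PySem.Str.join ". " parts ++ "."

-- ===== PORT B =====
def bField (e : List (String × String)) (k : String) : String :=
  ((PySem.Dict.mk e).get? k).getD ""

-- caps[lab]
def bCap (lab : String) : Nat :=
  ((PySem.Dict.mk [("PERSON", (5 : Nat)), ("ORG", 5), ("DATE", 3)]).get? lab).getD 0

-- loop body: lab = e["label"]; if lab in buckets: b = buckets[lab];
--            if len(b) < caps[lab] and text not in b: b.append(text)
def bStep (g : PySem.Dict String (List String)) (e : List (String × String)) : PySem.Dict String (List String) :=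
  let lab := bField e "label"
  if g.contains lab then
    let text := bField e "text"
    let b := g.getD lab []
    if b.length < bCap lab ∧ text ∉ b then g.insert lab (b ++ [text]) else g
  else g

-- the generator _sections, as the list of parts it yields, in yield order
def bSections (spacy_entities : List (List (String × String))) (it_entities : List (String × List String)) : List String :=
  let itd := PySem.Dict.mk it_entities
  let buckets := spacy_entities.foldl bStep (PySem.Dict.mk [("PERSON", []), ("ORG", []), ("DATE", [])])
  let people := buckets.getD "PERSON" []
  (if people.isEmpty then [] else
    if people.length == 1 then ["Mentions person: " ++ people.headD ""]
    else ["Mentions " ++ PySem.Int.toStr (people.length : Int) ++ " people: " ++ PySem.Str.join ", " people])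
  ++ (if (buckets.getD "ORG" []).isEmpty then [] else
      ["Organizations: " ++ PySem.Str.join ", " (buckets.getD "ORG" [])])
  ++ (if (buckets.getD "DATE" []).isEmpty then [] else
      ["Dates mentioned: " ++ PySem.Str.join ", " (buckets.getD "DATE" [])])
  ++ (([("ip_addresses", ("IP addresses", 3)), ("error_codes", ("Error codes", 3)),
        ("software_names", ("Software", 5)), ("hardware_names", ("Hardware", 5))] :
        List (String × String × Nat)).foldl
      (fun ps spec =>
        let vals := itd.getD spec.1 []
        if vals.isEmpty then ps else ps ++ [spec.2.1 ++ ": " ++ PySem.Str.join ", " (vals.take spec.2.2)]) [])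
  ++ (if (itd.getD "file_paths" []).isEmpty then [] else
      ["File paths referenced: " ++ PySem.Int.toStr ((itd.getD "file_paths" []).length : Int)])

def generate_entity_summary_py_alt (spacy_entities : List (List (String × String))) (it_entities : List (String × List String)) : String :=
  let parts := bSections spacy_entities it_entities
  if parts.isEmpty then "No significant entities extracted." else PySem.Str.join ". " parts ++ "."

-- ===== PRECONDITION & SPEC =====
-- Pre_ excludes exactly the inputs where A's Python raises KeyError: an entity dict without a
-- "label" key, or one whose label is PERSON/ORG/DATE but which has no "text" key.
def Pre_generate_entity_summary_py (spacy_entities : List (List (String × String))) (it_entities : List (String × List String)) : Prop :=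
  ∀ e ∈ spacy_entities, ((PySem.Dict.mk e).get? "label").isSome = true ∧
    (((PySem.Dict.mk e).get? "label").getD "" ∈ (["PERSON", "ORG", "DATE"] : List String) →
      ((PySem.Dict.mk e).get? "text").isSome = true)
instance (spacy_entities : List (List (String × String))) (it_entities : List (String × List String)) : Decidable (Pre_generate_entity_summary_py spacy_entities it_entities) := by unfold Pre_generate_entity_summary_py; infer_instance

def pvWitness_generate_entity_summary_py : (List (List (String × String))) × (List (String × List String)) :=
  ([[("label", "PERSON"), ("text", "Bob")], [("label", "ORG"), ("text", "IBM")]], [("ip_addresses", ["1.2.3.4"])])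

def Spec_generate_entity_summary_py (spacy_entities : List (List (String × String))) (it_entities : List (String × List String)) (out : String) : Prop := out = generate_entity_summary_py_alt spacy_entities it_entities
instance (spacy_entities : List (List (String × String))) (it_entities : List (String × List String)) (out : String) : Decidable (Spec_generate_entity_summary_py spacy_entities it_entities out) := by unfold Spec_generate_entity_summary_py; infer_instance

-- ===== CLAIM (what is proved, stated in full; the proofs are below) =====
def Claim_equal_generate_entity_summary_py : Prop := ∀ (spacy_entities : List (List (String × String))) (it_entities : List (String × List String)), Dom_generate_entity_summary_py spacy_entities it_entities → Pre_generate_entity_summary_py spacy_entities it_entities → Spec_generate_entity_summary_py spacy_entities it_entities (generate_entity_summary_py spacy_entities it_entities)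

-- ===== LEMMAS AND PROOFS =====

-- B's per-bucket update, isolated for the proofs (capped online dedup step)
def stepK (k : Nat) (b : List String) (t : String) : List String :=
  if b.length < k ∧ t ∉ b then b ++ [t] else b

-- B's fold over the mixed entity list, read off at one of the three fixed keys, is the capped
-- online-dedup fold over exactly the texts A's comprehension for that label collects.
theorem fold_bStep_getD (es : List (List (String × String))) (g : PySem.Dict String (List String))
    (hk : g.keys = ["PERSON", "ORG", "DATE"]) (c : String)
    (hc : c ∈ (["PERSON", "ORG", "DATE"] : List String)) :
    (es.foldl bStep g).getD c [] =
      ((es.filter (fun e => bField e "label" == c)).map (fun e => bField e "text")).foldl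
        (stepK (bCap c)) (g.getD c []) := by
  induction es generalizing g with
  | nil => simp
  | cons e t ih =>
    simp only [List.foldl_cons, List.filter_cons]
    by_cases hcl : bField e "label" = c
    · have hcont : g.contains (bField e "label") = true := by
        rw [PySem.Dict.contains_eq_decide_mem_keys, hk, hcl]; simpa using hc
      by_cases hcond : (g.getD (bField e "label") []).length < bCap (bField e "label") ∧
          bField e "text" ∉ g.getD (bField e "label") []
      · rw [show bStep g e = g.insert (bField e "label")
              (g.getD (bField e "label") [] ++ [bField e "text"]) by simp [bStep, hcont, hcond]]
        rw [ih _ (by rw [PySem.Dict.keys_insert_of_contains (h := hcont)]; exact hk)]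
        simp only [hcl] at hcond ⊢
        simp [List.foldl_cons, stepK, hcond]
      · rw [show bStep g e = g by simp [bStep, hcont, hcond]]
        rw [ih _ hk]
        simp only [hcl] at hcond ⊢
        simp [List.foldl_cons, stepK, hcond]
    · have h2 : (bField e "label" == c) = false := by simp [hcl]
      rw [h2]
      by_cases hcont : g.contains (bField e "label") = true
      · by_cases hcond : (g.getD (bField e "label") []).length < bCap (bField e "label") ∧
            bField e "text" ∉ g.getD (bField e "label") []
        · rw [show bStep g e = g.insert (bField e "label")
                (g.getD (bField e "label") [] ++ [bField e "text"]) by simp [bStep, hcont, hcond]]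
          rw [ih _ (by rw [PySem.Dict.keys_insert_of_contains (h := hcont)]; exact hk)]
          simp [PySem.Dict.getD_insert, Ne.symm hcl]
        · rw [show bStep g e = g by simp [bStep, hcont, hcond]]
          rw [ih _ hk]
          simp
      · simp only [Bool.not_eq_true] at hcont
        rw [show bStep g e = g by simp [bStep, hcont]]
        rw [ih _ hk]
        simp

-- the uncapped dedup fold only ever appends to its accumulator
theorem foldl_add_prefix (ts : List String) (acc : List String) :
    ∃ ex, ts.foldl PySem.Set.add acc = acc ++ ex := by
  induction ts generalizing acc with
  | nil => exact ⟨[], by simp⟩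
  | cons t ts ih =>
    simp only [List.foldl_cons, PySem.Set.add]
    by_cases h : PySem.Set.contains acc t = true
    · rw [if_pos h]; exact ih acc
    · rw [if_neg h]
      obtain ⟨ex, hex⟩ := ih (acc ++ [t])
      exact ⟨t :: ex, by simpa using hex⟩

theorem foldl_stepK_of_full (ts : List String) (acc : List String) (k : Nat)
    (h : k ≤ acc.length) : ts.foldl (stepK k) acc = acc := by
  induction ts with
  | nil => rfl
  | cons t ts ih => simpa [stepK, show ¬ acc.length < k by omega] using ih

-- the capped online-dedup fold is the uncapped dedup fold, truncated to k
theorem foldl_stepK_eq_take (ts : List String) (acc : List String) (k : Nat)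
    (h : acc.length ≤ k) :
    ts.foldl (stepK k) acc = (ts.foldl PySem.Set.add acc).take k := by
  induction ts generalizing acc with
  | nil => simp [List.take_of_length_le h]
  | cons t ts ih =>
    by_cases h1 : acc.length < k
    · by_cases hm : t ∈ acc
      · simpa [stepK, hm, PySem.Set.add, List.contains_iff_mem.mpr hm] using ih acc h
      · have : acc.contains t = false := by simpa using hm
        simpa [stepK, h1, hm, PySem.Set.add, this] using ih (acc ++ [t]) (by simp; omega)
    · have hk : k = acc.length := by omega
      rw [foldl_stepK_of_full _ _ _ (by omega)]
      obtain ⟨ex, hex⟩ := foldl_add_prefix (t :: ts) acc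
      rw [hex, hk, List.take_left]

-- capped online dedup from the empty bucket = dict.fromkeys then [:k]
theorem foldl_stepK_nil (ts : List String) (k : Nat) :
    ts.foldl (stepK k) [] = (PySem.List.dedup ts).take k := by
  rw [foldl_stepK_eq_take ts [] k (by simp), PySem.List.dedup_eq_ofList,
    PySem.Set.ofList_eq_foldl]

theorem isEmpty_take_dedup (xs : List String) (k : Nat) (hk : 0 < k) :
    ((PySem.List.dedup xs).take k).isEmpty = xs.isEmpty := by
  cases xs with
  | nil => simp [PySem.List.dedup, PySem.Set.ofList]
  | cons x t =>
    simp only [List.isEmpty_cons]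
    rw [List.isEmpty_eq_false_iff, ← List.length_pos_iff, List.length_take]
    have hx : x ∈ PySem.List.dedup (x :: t) := by
      rw [PySem.List.mem_dedup]; exact List.mem_cons_self
    have := List.length_pos_of_mem hx
    omega

theorem bField_eq : bField = aField := rfl

-- push A's running appends into segment form, so both sides become the same concatenation
theorem ite_append_singleton (c : Prop) [Decidable c] (ps : List String) (x : String) :
    (if c then ps else ps ++ [x]) = ps ++ (if c then [] else [x]) := by
  split_ifs <;> simp

-- ===== VERDICT (by name: the statement is the Claim_ definition above) =====
theorem generate_entity_summary_py_spec : Claim_equal_generate_entity_summary_py := by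
  intro sp it _ _
  unfold Spec_generate_entity_summary_py generate_entity_summary_py generate_entity_summary_py_alt bSections
  have hg : ∀ c, c ∈ (["PERSON", "ORG", "DATE"] : List String) →
      (sp.foldl bStep (PySem.Dict.mk [("PERSON", []), ("ORG", []), ("DATE", [])])).getD c [] =
        (PySem.List.dedup
          ((sp.filter (fun e => aField e "label" == c)).map (fun e => aField e "text"))).take (bCap c) := by
    intro c hc
    rw [fold_bStep_getD sp _ rfl c hc, bField_eq]
    have h0 : (PySem.Dict.mk [("PERSON", ([] : List String)), ("ORG", []), ("DATE", [])]).getD c [] = [] := by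
      fin_cases hc <;> rfl
    rw [h0, foldl_stepK_nil]
  simp only [hg "PERSON" (by simp), hg "ORG" (by simp), hg "DATE" (by simp),
    show bCap "PERSON" = 5 from rfl, show bCap "ORG" = 5 from rfl, show bCap "DATE" = 3 from rfl,
    isEmpty_take_dedup _ 5 (by omega), isEmpty_take_dedup _ 3 (by omega),
    List.foldl_cons, List.foldl_nil, List.take_take]
  simp only [ite_append_singleton]
  simp only [List.append_assoc, List.nil_append]
  rfl
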